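-- pv_equiv track=rewrite | github.com/WantKakao/problemSolving | 백준/Gold/7570. 줄 세우기/줄 세우기.py | solve
-- ===== SOURCE A (Python) =====
-- def solve(n, children):
--     # 각 숫자의 위치를 저장
--     positions = {num: i for i, num in enumerate(children)}
--     visited = [False for _ in range(n+1)]
--     # 연속된 숫자들의 최대 길이를 찾음
--     max_len = 0
--     for start in range(1, n + 1):
--         if not visited[start]:
--             visited[start] = True
--             current_len = 1
--             current = start
--             while current + 1 in positions and positions[current + 1] > positions[current]:
--                 current += 1
--                 visited[current] = True
--                 current_len += 1
--             max_len = max(max_len, current_len)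
--
--     # 이동해야 할 어린이 수 반환
--     return n - max_len
-- ===== SOURCE B (Python) =====
-- def solve(n, children):
--     positions = {num: i for i, num in enumerate(children)}
--     best = 0
--     cur = 0
--     for v in range(1, n + 1):
--         if v in positions and v - 1 in positions and positions[v] > positions[v - 1]:
--             cur += 1
--         else:
--             cur = 1
--         best = max(best, cur)
--     return n - best
-- ===== Notes on version B (the rewrite author's own statement) =====
-- stated objective: simpler
-- what changed: Replaces A's visited-array bookkeeping with nested while-loop chain extension by a single flat forward scan over values 1..n that maintains the current consecutive-run length and its maximum.
-- outside the precondition, e.g. on solve(1, [2, 1]): A returns 0, B returns 0; on solve(2, [2, 3]): A raises KeyError, B returns 1; on solve(1, [1, 2]): A raises IndexError, B returns 0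
import Mathlib
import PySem

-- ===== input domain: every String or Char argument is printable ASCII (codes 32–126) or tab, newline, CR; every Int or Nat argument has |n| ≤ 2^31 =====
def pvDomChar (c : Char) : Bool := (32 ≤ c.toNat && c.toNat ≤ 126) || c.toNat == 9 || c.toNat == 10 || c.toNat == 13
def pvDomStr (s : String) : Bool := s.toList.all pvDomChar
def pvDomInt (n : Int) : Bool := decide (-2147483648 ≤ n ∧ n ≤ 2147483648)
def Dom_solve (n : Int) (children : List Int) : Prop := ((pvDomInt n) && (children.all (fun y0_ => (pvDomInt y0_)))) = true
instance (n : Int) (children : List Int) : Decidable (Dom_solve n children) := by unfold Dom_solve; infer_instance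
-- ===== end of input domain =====

-- B replaces A's visited-array bookkeeping and nested while-loop chain extension by a single
-- flat forward scan maintaining the current consecutive-run length (objective: simpler).

-- ===== PORT A =====
-- positions = {num: i for i, num in enumerate(children)}  (identical comprehension in both sources)
def buildPositions (children : List Int) : PySem.Dict Int Int :=
  (PySem.List.enumerate children 0).foldl (fun d p => d.insert p.2 p.1) PySem.Dict.empty

-- the inner 'while current + 1 in positions and positions[current+1] > positions[current]':
-- fuel-bounded ((n - start).toNat steps always suffice inside Pre_solve, where the chain stays ≤ n);
-- the KeyError case (current+1 present, current absent: Python raises) is excluded by Pre_solve,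
-- the port stops there.
def chainA (positions : PySem.Dict Int Int) : Nat → Int → Int → Array Bool → Int × Array Bool
  | 0, _, len, vis => (len, vis)
  | fuel+1, current, len, vis =>
    match positions.get? (current + 1), positions.get? current with
    | some a, some b =>
      if b < a then
        chainA positions fuel (current + 1) (len + 1) (vis.setIfInBounds (current + 1).toNat true)
      else (len, vis)
    | _, _ => (len, vis)

-- loop body of 'for start in range(1, n+1)'; visited[start] is in range whenever the loop runs
def astep (n : Int) (positions : PySem.Dict Int Int) (st : Int × Array Bool) (start : Int) :
    Int × Array Bool :=
  if st.2.getD start.toNat false then st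
  else
    let vis := st.2.setIfInBounds start.toNat true
    let r := chainA positions (n - start).toNat start 1 vis
    (max st.1 r.1, r.2)

def solve (n : Int) (children : List Int) : Int :=
  let positions := buildPositions children
  let visited := (List.replicate (n + 1).toNat false).toArray
  n - ((PySem.List.pyRange 1 (n + 1) 1).foldl (astep n positions) (0, visited)).1

-- ===== PORT B =====
-- loop body of 'for v in range(1, n+1)': one flat scan, state (best, cur)
def bstep (positions : PySem.Dict Int Int) (st : Int × Int) (v : Int) : Int × Int :=
  let cur := match positions.get? v, positions.get? (v - 1) with
    | some a, some b => if b < a then st.2 + 1 else 1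
    | _, _ => 1
  (max st.1 cur, cur)

def solve_alt (n : Int) (children : List Int) : Int :=
  let positions := buildPositions children
  n - ((PySem.List.pyRange 1 (n + 1) 1).foldl (bstep positions) (0, 0)).1

-- ===== PRECONDITION & SPEC =====
-- Pre_solve excludes inputs where some value v ∈ [1,n] is absent while v+1 is present (A raises
-- KeyError at start v) and inputs containing n+1 when n ≥ 1 (A's chain can overrun the visited
-- array, IndexError; on those n+1-containing inputs whose position order happens to stop the
-- chain early A still returns — see the cite (1, [2, 1]) — the corner is excluded as a whole).
def Pre_solve (n : Int) (children : List Int) : Prop :=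
  (∀ x ∈ children, 2 ≤ x → x ≤ n + 1 → (x - 1) ∈ children) ∧ ((n + 1) ∉ children ∨ n ≤ 0)
instance (n : Int) (children : List Int) : Decidable (Pre_solve n children) := by
  unfold Pre_solve; infer_instance

def pvWitness_solve : Int × List Int := (3, [2, 1, 3])

def Spec_solve (n : Int) (children : List Int) (out : Int) : Prop := out = solve_alt n children
instance (n : Int) (children : List Int) (out : Int) : Decidable (Spec_solve n children out) := by
  unfold Spec_solve; infer_instance

-- ===== CLAIM (what is proved, stated in full; the proofs are below) =====
def Claim_equal_solve : Prop := ∀ (n : Int) (children : List Int), Dom_solve n children →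
  Pre_solve n children → Spec_solve n children (solve n children)

-- ===== LEMMAS AND PROOFS =====

-- the chain-continuation condition: from value v the chain extends to v+1
def c2 (positions : PySem.Dict Int Int) (v : Int) : Bool :=
  match positions.get? (v + 1), positions.get? v with
  | some a, some b => decide (b < a)
  | _, _ => false

-- B's run length ending at value k, and the running maximum
def RR (positions : PySem.Dict Int Int) : Nat → Int
  | 0 => 0
  | k+1 => if c2 positions (k : Int) then RR positions k + 1 else 1

def bb (positions : PySem.Dict Int Int) : Nat → Int
  | 0 => 0
  | k+1 => max (bb positions k) (RR positions (k+1))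

-- visited array with exactly [1, e] set
def visA (n e : Int) : List Bool :=
  (List.range (n + 1).toNat).map (fun i : Nat => decide (1 ≤ (i : Int) ∧ (i : Int) ≤ e))

-- end of the chain starting at cur
def runEnd (positions : PySem.Dict Int Int) : Nat → Int → Int
  | 0, cur => cur
  | m+1, cur => if c2 positions cur then runEnd positions m (cur + 1) else cur

lemma c2_eq_true_iff (positions : PySem.Dict Int Int) (v : Int) :
    c2 positions v = true ↔ ∃ a b, positions.get? (v + 1) = some a ∧
      positions.get? v = some b ∧ b < a := by
  unfold c2
  rcases h1 : positions.get? (v + 1) with _ | a <;> rcases h2 : positions.get? v with _ | b <;>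
    simp

lemma chainA_stop (positions : PySem.Dict Int Int) (fuel : Nat) (cur len : Int) (vis : Array Bool)
    (h : c2 positions cur = false) : chainA positions fuel cur len vis = (len, vis) := by
  cases fuel with
  | zero => rfl
  | succ m =>
    unfold chainA c2 at *
    rcases h1 : positions.get? (cur + 1) with _ | a <;>
      rcases h2 : positions.get? cur with _ | b <;> simp [h1, h2] at h ⊢
    omega

lemma bstep_eq (positions : PySem.Dict Int Int) (st : Int × Int) (v : Int) :
    bstep positions st v =
      (max st.1 (if c2 positions (v - 1) then st.2 + 1 else 1),
       if c2 positions (v - 1) then st.2 + 1 else 1) := by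
  have hv : v - 1 + 1 = v := by ring
  unfold bstep c2
  rw [hv]
  rcases h1 : positions.get? v with _ | a <;> rcases h2 : positions.get? (v - 1) with _ | b <;>
        simp

lemma Bfold (positions : PySem.Dict Int Int) (k : Nat) :
    (PySem.List.pyRange 1 ((k : Int) + 1) 1).foldl (bstep positions) (0, 0) =
      (bb positions k, RR positions k) := by
  induction k with
  | zero => simp [PySem.List.pyRange_one_eq_nil (by omega : (1:Int) ≥ 1), bb, RR]
  | succ k ih =>
    have hsplit : PySem.List.pyRange 1 (((k+1 : Nat) : Int) + 1) 1 =
        PySem.List.pyRange 1 ((k : Int) + 1) 1 ++ [(k : Int) + 1] := by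
      have := PySem.List.pyRange_one_succ_right (a := 1) (b := (k : Int) + 1) (by omega)
      push_cast
      convert this using 2
    rw [hsplit, List.foldl_append, ih]
    simp only [List.foldl_cons, List.foldl_nil, bstep_eq]
    have h1 : (k : Int) + 1 - 1 = (k : Int) := by ring
    rw [h1]
    simp [bb, RR]

lemma mem_of_get? (children : List Int) (v a : Int)
    (h : (buildPositions children).get? v = some a) : v ∈ children := by
  have hk : v ∈ (buildPositions children).keys := by
    by_contra hv
    rw [← PySem.Dict.get?_eq_none_iff_not_mem_keys] at hv
    simp [hv] at h
  have hkeys : (buildPositions children).keys =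
      PySem.Set.update PySem.Dict.empty.keys
        (List.map (fun p => p.2) (PySem.List.enumerate children 0)) :=
    PySem.Dict.keys_foldl_insert_key (ν := Int)
      (PySem.List.enumerate children 0) (fun p => p.2) (fun _ p => p.1) PySem.Dict.empty
  rw [hkeys, PySem.List.map_snd_enumerate] at hk
  simpa [PySem.Set.mem_update] using hk

lemma arr_getD (l : List Bool) (i : Nat) (v : Bool) : l.toArray.getD i v = l.getD i v := by
  rw [Array.getD_eq_getD_getElem?, List.getD_eq_getElem?_getD, List.getElem?_toArray]

lemma visA_getD (n e j : Int) (h0 : 0 ≤ j) (h1 : j ≤ n) :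
    (visA n e).getD j.toNat false = decide (1 ≤ j ∧ j ≤ e) := by
  have hlen : j.toNat < ((List.range (n + 1).toNat).map
      (fun i : Nat => decide (1 ≤ (i : Int) ∧ (i : Int) ≤ e))).length := by
    simp only [List.length_map, List.length_range]; omega
  unfold visA
  rw [List.getD_eq_getElem _ _ hlen]
  simp only [List.getElem_map, List.getElem_range]
  rw [decide_eq_decide]
  omega

lemma visA_set (n cur : Int) (h0 : 0 ≤ cur) (_h1 : cur + 1 ≤ n) :
    (visA n cur).set (cur + 1).toNat true = visA n (cur + 1) := by
  apply List.ext_getElem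
  · simp only [visA, List.length_set, List.length_map, List.length_range]
  · intro i h1 h2
    simp only [visA, List.length_map, List.length_range] at h2
    rw [List.getElem_set]
    by_cases hi : (cur + 1).toNat = i
    · rw [if_pos hi]
      simp only [visA, List.getElem_map, List.getElem_range]
      symm
      rw [decide_eq_true_iff]
      omega
    · rw [if_neg hi]
      simp only [visA, List.getElem_map, List.getElem_range]
      rw [decide_eq_decide]
      omega

lemma visA_zero (n : Int) : List.replicate (n + 1).toNat false = visA n 0 := by
  apply List.ext_getElem
  · simp only [visA, List.length_replicate, List.length_map, List.length_range]
  · intro i h1 h2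
    rw [List.getElem_replicate]
    simp only [visA, List.getElem_map, List.getElem_range]
    symm
    rw [decide_eq_false_iff_not]
    omega

lemma runEnd_spec (positions : PySem.Dict Int Int) (n : Int) (hcn : c2 positions n = false) :
    ∀ (m : Nat) (cur : Int), cur ≤ n → n - cur ≤ (m : Int) →
      cur ≤ runEnd positions m cur ∧ runEnd positions m cur ≤ n ∧
      (∀ v, cur ≤ v → v < runEnd positions m cur → c2 positions v = true) ∧
      c2 positions (runEnd positions m cur) = false := by
  intro m
  induction m with
  | zero =>
    intro cur h1 h2
    have : cur = n := by omega
    subst this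
    simp only [runEnd]
    exact ⟨le_refl _, le_refl _, by intro v hv1 hv2; omega, hcn⟩
  | succ m ih =>
    intro cur h1 h2
    by_cases hc : c2 positions cur = true
    · have hne : cur ≠ n := by rintro rfl; rw [hcn] at hc; exact Bool.false_ne_true hc
      have hlt : cur + 1 ≤ n := by omega
      obtain ⟨e1, e2, e3, e4⟩ := ih (cur + 1) hlt (by omega)
      rw [runEnd, if_pos hc]
      refine ⟨by omega, e2, ?_, e4⟩
      intro v hv1 hv2
      by_cases hv : v = cur
      · subst hv; exact hc
      · exact e3 v (by omega) hv2
    · rw [runEnd, if_neg hc]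
      exact ⟨le_refl _, h1, by intro v hv1 hv2; omega,
        by revert hc; cases c2 positions cur <;> simp⟩

lemma chain_run (positions : PySem.Dict Int Int) (n : Int) :
    ∀ (fuel : Nat) (cur len e : Int), 1 ≤ cur → cur ≤ e → e ≤ n →
      (∀ v, cur ≤ v → v < e → c2 positions v = true) → c2 positions e = false →
      e - cur ≤ (fuel : Int) →
      chainA positions fuel cur len (visA n cur).toArray =
        (len + (e - cur), (visA n e).toArray) := by
  intro fuel
  induction fuel with
  | zero =>
    intro cur len e h1 h2 h3 h4 h5 h6
    have : cur = e := by omega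
    subst this
    simp [chainA]
  | succ fuel ih =>
    intro cur len e h1 h2 h3 h4 h5 h6
    by_cases hce : cur = e
    · subst hce
      rw [chainA_stop _ _ _ _ _ h5]
      simp
    · have hlt : cur < e := by omega
      have hc : c2 positions cur = true := h4 cur (le_refl _) hlt
      rw [c2_eq_true_iff] at hc
      obtain ⟨a, b, ha, hb, hab⟩ := hc
      have hstep : chainA positions (fuel + 1) cur len (visA n cur).toArray =
          chainA positions fuel (cur + 1) (len + 1)
            (((visA n cur).toArray).setIfInBounds (cur + 1).toNat true) := by
        simp only [chainA, ha, hb]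
        simp [hab]
      rw [hstep, List.setIfInBounds_toArray, visA_set n cur (by omega) (by omega)]
      rw [ih (cur + 1) (len + 1) e (by omega) (by omega) h3
        (fun v hv1 hv2 => h4 v (by omega) hv2) h5 (by push_cast at h6 ⊢; omega)]
      simp only [Prod.mk.injEq]
      exact ⟨by ring, trivial⟩

lemma run_RR (positions : PySem.Dict Int Int) :
    ∀ (j : Nat) (s : Int), 1 ≤ s →
      (∀ v, s ≤ v → v < s + (j : Int) → c2 positions v = true) →
      (c2 positions (s - 1) = false ∨ s = 1) →
      RR positions (s + (j : Int)).toNat = (j : Int) + 1 := by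
  intro j
  induction j with
  | zero =>
    intro s hs hrun hstart
    have hnat : (s + ((0:Nat) : Int)).toNat = (s - 1).toNat + 1 := by omega
    rw [hnat, RR]
    have hcast : (((s - 1).toNat : Nat) : Int) = s - 1 := by omega
    rw [hcast]
    rcases hstart with h | h
    · rw [h]; simp
    · subst h
      norm_num [RR]
  | succ j ih =>
    intro s hs hrun hstart
    have hnat : (s + ((j+1 : Nat) : Int)).toNat = (s + (j : Int)).toNat + 1 := by
      push_cast; omega
    rw [hnat, RR]
    have hcast : (((s + (j : Int)).toNat : Nat) : Int) = s + (j : Int) := by omega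
    rw [hcast]
    have hc : c2 positions (s + (j : Int)) = true := hrun _ (by omega) (by push_cast; omega)
    rw [if_pos hc, ih s hs (fun v hv1 hv2 => hrun v hv1 (by push_cast at hv2 ⊢; omega)) hstart]
    push_cast; ring

lemma run_bb (positions : PySem.Dict Int Int) :
    ∀ (j : Nat) (s : Int), 1 ≤ s →
      (∀ v, s ≤ v → v < s + (j : Int) → c2 positions v = true) →
      (c2 positions (s - 1) = false ∨ s = 1) →
      bb positions (s + (j : Int)).toNat = max (bb positions (s - 1).toNat) ((j : Int) + 1) := by
  intro j
  induction j with
  | zero =>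
    intro s hs hrun hstart
    have hnat : (s + ((0:Nat) : Int)).toNat = (s - 1).toNat + 1 := by omega
    rw [hnat, bb, ← hnat, run_RR positions 0 s hs hrun hstart]
  | succ j ih =>
    intro s hs hrun hstart
    have hnat : (s + ((j+1 : Nat) : Int)).toNat = (s + (j : Int)).toNat + 1 := by
      push_cast; omega
    have hrun' : ∀ v, s ≤ v → v < s + (j : Int) → c2 positions v = true :=
      fun v hv1 hv2 => hrun v hv1 (by push_cast at hv2 ⊢; omega)
    rw [hnat, bb, ← hnat, run_RR positions (j+1) s hs hrun hstart, ih s hs hrun' hstart]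
    push_cast
    omega

lemma Afold (positions : PySem.Dict Int Int) (n : Int) (_hn : 1 ≤ n)
    (hcn : c2 positions n = false) :
    ∀ (k : Nat), (k : Int) ≤ n → ∃ e : Int, (k : Int) ≤ e ∧ e ≤ n ∧
      (∀ v, (k : Int) ≤ v → v < e → c2 positions v = true) ∧
      (c2 positions e = false ∨ e = 0) ∧
      (PySem.List.pyRange 1 ((k : Int) + 1) 1).foldl (astep n positions) (0, (visA n 0).toArray) =
        (bb positions e.toNat, (visA n e).toArray) := by
  intro k
  induction k with
  | zero =>
    intro _
    refine ⟨0, by omega, by omega, by intro v h1 h2; omega, Or.inr rfl, ?_⟩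
    simp [PySem.List.pyRange_one_eq_nil (by omega : (1:Int) ≥ 1), bb]
  | succ k ih =>
    intro hk1
    have hk : (k : Int) ≤ n := by push_cast at hk1; omega
    obtain ⟨e, he1, he2, he3, he4, he5⟩ := ih hk
    have hsplit : PySem.List.pyRange 1 (((k+1 : Nat) : Int) + 1) 1 =
        PySem.List.pyRange 1 ((k : Int) + 1) 1 ++ [(k : Int) + 1] := by
      have := PySem.List.pyRange_one_succ_right (a := 1) (b := (k : Int) + 1) (by omega)
      convert this using 2
    rw [hsplit, List.foldl_append, he5]
    simp only [List.foldl_cons, List.foldl_nil]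
    have hk1' : (k : Int) + 1 ≤ n := by push_cast at hk1; omega
    unfold astep
    rw [arr_getD, visA_getD n e ((k : Int) + 1) (by omega) hk1']
    by_cases hvis : (k : Int) + 1 ≤ e
    · rw [if_pos (by simp; omega)]
      exact ⟨e, by omega, he2, fun v hv1 hv2 => he3 v (by omega) hv2, he4, rfl⟩
    · rw [if_neg (by simp; omega)]
      have hek : e = (k : Int) := by omega
      subst hek
      -- start a new chain at s = k+1
      set s : Int := (k : Int) + 1 with hs
      have hsn : s ≤ n := hk1'
      obtain ⟨f1, f2, f3, f4⟩ := runEnd_spec positions n hcn (n - s).toNat s hsn (by omega)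
      set e' : Int := runEnd positions (n - s).toNat s with he'
      simp only
      rw [List.setIfInBounds_toArray, visA_set n (k : Int) (by omega) hk1']
      have hchain := chain_run positions n (n - s).toNat s 1 e' (by omega) f1 f2 f3 f4
        (by omega)
      have hse : s = (k : Int) + 1 := rfl
      rw [hse] at hchain
      rw [hchain]
      have hj : e' = s + ((e' - s).toNat : Int) := by omega
      have hrunj : ∀ v, s ≤ v → v < s + (((e' - s).toNat : Nat) : Int) →
          c2 positions v = true := by
        intro v hv1 hv2
        exact f3 v hv1 (by omega)
      have hstart : c2 positions (s - 1) = false ∨ s = 1 := by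
        rcases he4 with h | h
        · left; simpa [hs] using h
        · right; omega
      have hbb := run_bb positions (e' - s).toNat s (by omega) hrunj hstart
      refine ⟨e', by omega, f2, ?_, Or.inl f4, ?_⟩
      · intro v hv1 hv2
        exact f3 v (by omega) hv2
      · have h1 : (s - 1).toNat = k := by omega
        have h2 : (s + ((e' - s).toNat : Int)).toNat = e'.toNat := by omega
        rw [h2, h1] at hbb
        rw [hbb]
        have hknat : ((k : Int)).toNat = k := by omega
        rw [hknat]
        simp only [Prod.mk.injEq]
        exact ⟨by omega, trivial⟩

-- ===== VERDICT (by name: the statement is the Claim_ definition above) =====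
theorem solve_spec : Claim_equal_solve := by
  intro n children _hdom hpre
  unfold Spec_solve
  obtain ⟨hp1, hp2⟩ := hpre
  by_cases hn : n ≤ 0
  · simp [solve, solve_alt, PySem.List.pyRange_one_eq_nil (by omega : n + 1 ≤ 1)]
  · have hn1 : 1 ≤ n := by omega
    set positions := buildPositions children with hpos
    have hcn : c2 positions n = false := by
      unfold c2
      rcases hg : positions.get? (n + 1) with _ | a
      · rfl
      · exfalso
        have := mem_of_get? children (n + 1) a hg
        rcases hp2 with h | h
        · exact h this
        · omega
    obtain ⟨e, he1, he2, _, _, he5⟩ := Afold positions n hn1 hcn n.toNat (by omega)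
    have hee : e = n := by omega
    rw [hee] at he5
    have hcast : ((n.toNat : Nat) : Int) = n := by omega
    rw [hcast] at he5
    have hB := Bfold positions n.toNat
    rw [hcast] at hB
    simp only [solve, solve_alt, ← hpos]
    rw [visA_zero, he5, hB]
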